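-- pv_equiv track=rewrite | github.com/thisAbdU/A2SV-contest-Exercises | C_Permutation_Counting.py | permutation_string
-- ===== SOURCE A (Python) =====
-- import heapq
--
-- def permutation_string(n, k, arr):
--     heapq.heapify(arr)
--     while k > 0:
--         min_ = heapq.heappop(arr)
--         heapq.heappush(arr, min_ + 1)
--         k -= 1
--
--     min_ = min(arr)
--     ans = 1
--
--     for i in arr:
--         if i > min_:
--             ans += min_
--         else:
--             ans += min_ - 1
--
--     return ans
-- ===== SOURCE B (Python) =====
-- def permutation_string(n, k, arr):
--     # Water-filling: binary-search the final leveled minimum L, then a closed-form sum.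
--     # (A mutates arr via heapify/heappop; B leaves arr untouched.)
--     kk = max(k, 0)
--     m0 = min(arr)
--     lo, hi = m0, m0 + kk
--     while lo < hi:
--         mid = (lo + hi + 1) // 2
--         cost = sum(mid - x for x in arr if x < mid)
--         if cost <= kk:
--             lo = mid
--         else:
--             hi = mid - 1
--     L = lo
--     r = kk - sum(L - x for x in arr if x < L)
--     c = sum(1 for x in arr if x <= L)
--     return 1 + len(arr) * L - (c - r)
-- ===== Notes on version B (the rewrite author's own statement) =====
-- stated objective: alternative
-- what changed: Replaces A's k-step heap simulation (pop the minimum, push minimum+1, k times) with a binary search for the final water-filling level L and a closed-form answer 1 + len*L - (count(<=L) - leftover).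
import Mathlib
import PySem

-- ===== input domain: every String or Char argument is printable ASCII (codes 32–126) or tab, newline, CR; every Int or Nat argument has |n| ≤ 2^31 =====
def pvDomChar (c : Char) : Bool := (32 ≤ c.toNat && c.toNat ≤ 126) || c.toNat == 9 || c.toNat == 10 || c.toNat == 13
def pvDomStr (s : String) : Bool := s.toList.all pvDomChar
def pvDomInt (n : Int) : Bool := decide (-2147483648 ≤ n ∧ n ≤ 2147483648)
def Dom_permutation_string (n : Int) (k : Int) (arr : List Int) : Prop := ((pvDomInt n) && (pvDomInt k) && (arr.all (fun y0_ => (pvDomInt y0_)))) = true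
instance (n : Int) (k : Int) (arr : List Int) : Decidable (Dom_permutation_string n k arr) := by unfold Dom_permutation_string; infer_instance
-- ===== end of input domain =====

-- B replaces A's k heap pop/push steps by a binary search for the final water level
-- plus a closed-form sum (objective: alternative algorithm). A mutates arr in place
-- (heapify/pops); B does not — the equivalence proved is about the return value only.

-- ===== PORT A =====
-- heapq is ported at its contract level: heappop removes and returns a smallest
-- element, heappush adds one; A's result depends only on the heap's multiset.
def pvHeapPop (l : List Int) : Int × List Int :=
  match PySem.List.min? l (fun x => x) with
  | none => (0, l)            -- unreachable: Pre_ gives a nonempty heap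
  | some m => (m, l.erase m)

def pvSim : Nat → List Int → List Int
  | 0, l => l
  | j+1, l =>
      let p := pvHeapPop l
      pvSim j (p.2 ++ [p.1 + 1])

def permutation_string (n : Int) (k : Int) (arr : List Int) : Int :=
  let final := pvSim k.toNat arr          -- 'while k > 0' loop
  match PySem.List.min? final (fun x => x) with
  | none => 1                              -- unreachable under Pre_
  | some m => final.foldl (fun ans i => ans + (if m < i then m else m - 1)) 1

-- ===== PORT B =====
def pvCost (arr : List Int) (L : Int) : Int :=
  ((arr.filter (fun x => decide (x < L))).map (fun x => L - x)).sum

def pvBS (arr : List Int) (kk lo hi : Int) : Int :=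
  if h : lo < hi then
    let mid := PySem.Int.floordiv (lo + hi + 1) 2
    if pvCost arr mid ≤ kk then pvBS arr kk mid hi else pvBS arr kk lo (mid - 1)
  else lo
termination_by (hi - lo).toNat
decreasing_by
  · have := PySem.Int.floordiv_eq_iff_of_pos (a := lo + hi + 1) (b := 2) (q := mid) (by omega)
    have hm : mid = PySem.Int.floordiv (lo + hi + 1) 2 := rfl
    have := (this.mp hm.symm)
    omega
  · have := PySem.Int.floordiv_eq_iff_of_pos (a := lo + hi + 1) (b := 2) (q := mid) (by omega)
    have hm : mid = PySem.Int.floordiv (lo + hi + 1) 2 := rfl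
    have := (this.mp hm.symm)
    omega

def permutation_string_alt (n : Int) (k : Int) (arr : List Int) : Int :=
  let kk := max k 0
  match PySem.List.min? arr (fun x => x) with
  | none => 0                              -- unreachable: Pre_ gives arr ≠ []
  | some m0 =>
    let L := pvBS arr kk m0 (m0 + kk)
    let r := kk - pvCost arr L
    let c : Int := (arr.filter (fun x => decide (x ≤ L))).length
    1 + (arr.length : Int) * L - (c - r)

-- ===== PRECONDITION & SPEC =====
-- A raises (IndexError from heappop, or ValueError from min([])) on the empty list.
def Pre_permutation_string (n : Int) (k : Int) (arr : List Int) : Prop := arr ≠ []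
instance (n : Int) (k : Int) (arr : List Int) : Decidable (Pre_permutation_string n k arr) := by
  unfold Pre_permutation_string; infer_instance

def pvWitness_permutation_string : Int × Int × List Int := (3, 4, [2, 1, 3])

def Spec_permutation_string (n : Int) (k : Int) (arr : List Int) (out : Int) : Prop := out = permutation_string_alt n k arr
instance (n : Int) (k : Int) (arr : List Int) (out : Int) : Decidable (Spec_permutation_string n k arr out) := by unfold Spec_permutation_string; infer_instance

-- ===== CLAIM (what is proved, stated in full; the proofs are below) =====
def Claim_equal_permutation_string : Prop := ∀ (n : Int) (k : Int) (arr : List Int), Dom_permutation_string n k arr → Pre_permutation_string n k arr → Spec_permutation_string n k arr (permutation_string n k arr)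

-- ===== LEMMAS AND PROOFS =====

-- count of elements ≤ L (in the ORIGINAL multiset), as an Int
def pvCnt (arr : List Int) (L : Int) : Int :=
  ((arr.filter (fun x => decide (x ≤ L))).length : Int)

-- the multiset after j levelling steps: (cnt-r) copies of L, r copies of L+1,
-- and the untouched elements above L
def pvCanon (arr : List Int) (L r : Int) : Multiset Int :=
  Multiset.replicate (pvCnt arr L - r).toNat L + Multiset.replicate r.toNat (L + 1) +
    (↑(arr.filter (fun x => decide (L < x))) : Multiset Int)

def pvStep (l : List Int) : List Int :=
  let p := pvHeapPop l
  p.2 ++ [p.1 + 1]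

theorem pvCost_eq_sum (arr : List Int) (L : Int) :
    pvCost arr L = (arr.map (fun x => max (L - x) 0)).sum := by
  induction arr with
  | nil => rfl
  | cons a t ih =>
    simp only [pvCost, List.filter_cons, List.map_cons, List.sum_cons] at *
    by_cases h : a < L
    · simp [h, ih]; omega
    · simp [h, ih]; omega

theorem pvCost_succ (arr : List Int) (L : Int) :
    pvCost arr (L + 1) = pvCost arr L + pvCnt arr L := by
  rw [pvCost_eq_sum, pvCost_eq_sum]
  induction arr with
  | nil => simp [pvCnt]
  | cons a t ih =>
    simp only [pvCnt, List.filter_cons, List.map_cons, List.sum_cons] at *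
    by_cases h : a ≤ L <;> simp [h] <;> omega

theorem pvCnt_mono (arr : List Int) {L L' : Int} (h : L ≤ L') :
    pvCnt arr L ≤ pvCnt arr L' := by
  induction arr with
  | nil => simp [pvCnt]
  | cons a t ih =>
    simp only [pvCnt, List.filter_cons] at *
    by_cases h1 : a ≤ L <;> by_cases h2 : a ≤ L' <;> simp [h1, h2] <;> omega

theorem pvCost_mono (arr : List Int) {L L' : Int} (h : L ≤ L') :
    pvCost arr L ≤ pvCost arr L' := by
  rw [pvCost_eq_sum, pvCost_eq_sum]
  apply List.sum_le_sum
  intro i _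
  omega

-- characterization is unique
theorem pvChar_unique (arr : List Int) {j L L' : Int}
    (h1 : pvCost arr L ≤ j) (h2 : j < pvCost arr (L + 1))
    (h1' : pvCost arr L' ≤ j) (h2' : j < pvCost arr (L' + 1)) : L = L' := by
  by_contra hne
  rcases lt_or_gt_of_ne hne with h | h
  · have := pvCost_mono arr (show L + 1 ≤ L' by omega); omega
  · have := pvCost_mono arr (show L' + 1 ≤ L by omega); omega

theorem pvBS_char_fuel (arr : List Int) (kk : Int) :
    ∀ (N : Nat) (lo hi : Int), (hi - lo).toNat ≤ N → lo ≤ hi →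
      pvCost arr lo ≤ kk → kk < pvCost arr (hi + 1) →
      pvCost arr (pvBS arr kk lo hi) ≤ kk ∧ kk < pvCost arr (pvBS arr kk lo hi + 1) := by
  intro N
  induction N with
  | zero =>
    intro lo hi hN hle hclo hchi
    have heq : ¬ lo < hi := by omega
    rw [pvBS]
    simp only [heq, dite_false]
    have : lo = hi := by omega
    subst this
    exact ⟨hclo, hchi⟩
  | succ N ih =>
    intro lo hi hN hle hclo hchi
    by_cases h : lo < hi
    · rw [pvBS]
      simp only [h, dite_true]
      have hmid := (PySem.Int.floordiv_eq_iff_of_pos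
        (a := lo + hi + 1) (b := 2) (q := PySem.Int.floordiv (lo + hi + 1) 2)
        (by omega)).mp rfl
      by_cases hc : pvCost arr (PySem.Int.floordiv (lo + hi + 1) 2) ≤ kk
      · simp only [hc, ite_true]
        exact ih _ hi (by omega) (by omega) hc hchi
      · simp only [hc, ite_false]
        have : kk < pvCost arr (PySem.Int.floordiv (lo + hi + 1) 2 - 1 + 1) := by
          have : PySem.Int.floordiv (lo + hi + 1) 2 - 1 + 1 = PySem.Int.floordiv (lo + hi + 1) 2 := by omega
          rw [this]; omega
        exact ih lo _ (by omega) (by omega) hclo this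
    · rw [pvBS]
      simp only [h, dite_false]
      have : lo = hi := by omega
      subst this
      exact ⟨hclo, hchi⟩

theorem pvBS_char (arr : List Int) (kk : Int) (lo hi : Int) (hle : lo ≤ hi)
    (hclo : pvCost arr lo ≤ kk) (hchi : kk < pvCost arr (hi + 1)) :
    pvCost arr (pvBS arr kk lo hi) ≤ kk ∧ kk < pvCost arr (pvBS arr kk lo hi + 1) :=
  pvBS_char_fuel arr kk (hi - lo).toNat lo hi le_rfl hle hclo hchi

-- min? from a multiset description
theorem pvMin?_of_multiset (l : List Int) (L : Int)
    (hmem : L ∈ l) (hlb : ∀ x ∈ l, L ≤ x) :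
    PySem.List.min? l (fun x => x) = some L := by
  cases hm : PySem.List.min? l (fun x => x) with
  | none =>
    rw [PySem.List.min?_eq_none_iff] at hm
    subst hm; simp at hmem
  | some m =>
    have h1 := PySem.List.min?_mem hm
    have h2 := PySem.List.min?_isMin hm L hmem
    have h3 := hlb m h1
    have : m = L := le_antisymm h2 h3
    rw [this]

theorem pvSim_succ (j : Nat) : ∀ l : List Int, pvSim (j + 1) l = pvStep (pvSim j l) := by
  induction j with
  | zero => intro l; rfl
  | succ j ih =>
    intro l
    show pvSim (j + 1) (pvStep l) = pvStep (pvSim (j+1) l)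
    rw [ih (pvStep l)]
    congr 1

-- one multiset step on a canonical state
theorem pvStep_multiset (l : List Int) (m : Int) (h : PySem.List.min? l (fun x => x) = some m) :
    (↑(pvStep l) : Multiset Int) = ((↑l : Multiset Int).erase m) + {m + 1} := by
  have hmem := PySem.List.min?_mem h
  simp [pvStep, pvHeapPop, h, Multiset.coe_erase]
  rfl


theorem pvCnt_pos (arr : List Int) (m0 : Int) (h : m0 ∈ arr) : 1 ≤ pvCnt arr m0 := by
  have : m0 ∈ arr.filter (fun x => decide (x ≤ m0)) := by
    simp [List.mem_filter, h]
  have := List.length_pos_of_mem this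
  simp only [pvCnt]
  omega

theorem pvCost_min_eq_zero (arr : List Int) (m0 : Int)
    (hmin : PySem.List.min? arr (fun x => x) = some m0) : pvCost arr m0 = 0 := by
  rw [pvCost_eq_sum]
  apply List.sum_eq_zero
  intro x hx
  simp only [List.mem_map] at hx
  obtain ⟨y, hy, rfl⟩ := hx
  have := PySem.List.min?_isMin hmin y hy
  omega

theorem pvCost_top (arr : List Int) (m0 kk : Int)
    (hmin : PySem.List.min? arr (fun x => x) = some m0) (hkk : 0 ≤ kk) :
    kk < pvCost arr (m0 + kk + 1) := by
  have hmem := PySem.List.min?_mem hmin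
  rw [pvCost_eq_sum]
  have h1 : (kk + 1 : Int) ∈ arr.map (fun x => max (m0 + kk + 1 - x) 0) := by
    refine List.mem_map.mpr ⟨m0, hmem, ?_⟩
    omega
  have h2 : ∀ x ∈ arr.map (fun x => max (m0 + kk + 1 - x) 0), (0:Int) ≤ x := by
    intro x hx
    simp only [List.mem_map] at hx
    obtain ⟨y, _, rfl⟩ := hx
    omega
  have := List.single_le_sum h2 _ h1
  omega

theorem pvFilter_replicate {p : Int → Bool} (l : List Int) (v : Int)
    (h : ∀ x ∈ l, p x = true → x = v) :
    (↑(l.filter p) : Multiset Int) = Multiset.replicate (l.filter p).length v := by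
  rw [Multiset.eq_replicate]
  constructor
  · simp
  · intro b hb
    rw [Multiset.mem_coe, List.mem_filter] at hb
    exact h b hb.1 hb.2

theorem pvFilter_partition (l : List Int) (p q r : Int → Bool)
    (h : ∀ x, p x = true ↔ (q x = true ∨ r x = true))
    (h2 : ∀ x, ¬(q x = true ∧ r x = true)) :
    (↑(l.filter p) : Multiset Int) = ↑(l.filter q) + ↑(l.filter r) := by
  have hcoe : ∀ (x : Int) (l : List Int), (↑(x :: l) : Multiset Int) = x ::ₘ ↑l :=
    fun _ _ => rfl
  induction l with
  | nil => simp
  | cons a t ih =>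
    simp only [List.filter_cons]
    by_cases hq : q a = true <;> by_cases hr : r a = true
    · exact absurd ⟨hq, hr⟩ (h2 a)
    · have hp : p a = true := (h a).mpr (Or.inl hq)
      rw [if_pos hp, if_pos hq, if_neg hr, hcoe, hcoe, ih, Multiset.cons_add]
    · have hp : p a = true := (h a).mpr (Or.inr hr)
      rw [if_pos hp, if_neg hq, if_pos hr, hcoe, hcoe, ih, Multiset.add_cons]
    · have hp : ¬ p a = true := fun hp => by rcases (h a).mp hp with h' | h' <;> simp_all
      rw [if_neg hp, if_neg hq, if_neg hr, ih]

theorem pvCntLen_succ (l : List Int) (L : Int) :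
    (l.filter (fun x => decide (x ≤ L + 1))).length
      = (l.filter (fun x => decide (x ≤ L))).length
        + (l.filter (fun x => decide (x = L + 1))).length := by
  induction l with
  | nil => simp
  | cons a t ih =>
    simp only [List.filter_cons]
    by_cases h1 : a ≤ L + 1 <;> by_cases h2 : a ≤ L <;> by_cases h3 : a = L + 1 <;>
      simp [h1, h2, h3] <;> omega

theorem pvCnt_succ (arr : List Int) (L : Int) :
    pvCnt arr (L + 1) = pvCnt arr L + ((arr.filter (fun x => decide (x = L + 1))).length : Int) := by
  simp only [pvCnt]
  rw [pvCntLen_succ]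
  push_cast
  ring

theorem pvLenLen_partition (l : List Int) (L : Int) :
    l.length = (l.filter (fun x => decide (x ≤ L))).length
      + (l.filter (fun x => decide (L < x))).length := by
  induction l with
  | nil => simp
  | cons a t ih =>
    simp only [List.filter_cons]
    by_cases h1 : a ≤ L <;> by_cases h2 : L < a <;> simp [h1, h2] <;> omega

theorem pvLen_partition (arr : List Int) (L : Int) :
    (arr.length : Int) = pvCnt arr L + ((arr.filter (fun x => decide (L < x))).length : Int) := by
  simp only [pvCnt]
  rw [pvLenLen_partition arr L]
  push_cast
  ring

-- the main invariant: after j steps the heap is a canonical water-filled multiset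
theorem pvSim_canon (arr : List Int) (m0 : Int)
    (hmin : PySem.List.min? arr (fun x => x) = some m0) :
    ∀ j : Nat, ∃ L r : Int,
      pvCost arr L ≤ (j : Int) ∧ (j : Int) < pvCost arr (L + 1) ∧
      r = (j : Int) - pvCost arr L ∧
      (↑(pvSim j arr) : Multiset Int) = pvCanon arr L r := by
  intro j
  induction j with
  | zero =>
    refine ⟨m0, 0, ?_, ?_, ?_, ?_⟩
    · simp [pvCost_min_eq_zero arr m0 hmin]
    · rw [pvCost_succ, pvCost_min_eq_zero arr m0 hmin]
      have := pvCnt_pos arr m0 (PySem.List.min?_mem hmin)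
      push_cast; omega
    · simp [pvCost_min_eq_zero arr m0 hmin]
    · show (↑arr : Multiset Int) = _
      have hsplit := pvFilter_partition arr (fun _ => true)
        (fun x => decide (x ≤ m0)) (fun x => decide (m0 < x))
        (by intro x; simp; try omega) (by intro x; simp; try omega)
      simp only [List.filter_true] at hsplit
      have hrep := pvFilter_replicate (p := fun x => decide (x ≤ m0)) arr m0
        (by intro x hx hle
            have := PySem.List.min?_isMin hmin x hx
            simp only [decide_eq_true_eq] at hle
            omega)
      rw [hsplit, hrep]
      unfold pvCanon
      simp [pvCnt]
  | succ j ih =>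
    obtain ⟨L, r, h1, h2, h3, hms⟩ := ih
    have hcs := pvCost_succ arr L
    have hr0 : 0 ≤ r := by omega
    have hrc : r < pvCnt arr L := by omega
    have hmemL : L ∈ pvSim j arr := by
      rw [← Multiset.mem_coe, hms]
      unfold pvCanon
      rw [Multiset.mem_add, Multiset.mem_add]
      left; left
      rw [Multiset.mem_replicate]
      exact ⟨by omega, rfl⟩
    have hlb : ∀ x ∈ pvSim j arr, L ≤ x := by
      intro x hx
      rw [← Multiset.mem_coe, hms] at hx
      unfold pvCanon at hx
      rw [Multiset.mem_add, Multiset.mem_add] at hx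
      rcases hx with (hx | hx) | hx
      · rw [Multiset.mem_replicate] at hx; omega
      · rw [Multiset.mem_replicate] at hx; omega
      · rw [Multiset.mem_coe, List.mem_filter] at hx
        have := hx.2; simp only [decide_eq_true_eq] at this; omega
    have hminj := pvMin?_of_multiset _ L hmemL hlb
    have hstep : (↑(pvSim (j + 1) arr) : Multiset Int) = (pvCanon arr L r).erase L + {L + 1} := by
      rw [pvSim_succ, pvStep_multiset _ L hminj, hms]
    have herase : (pvCanon arr L r).erase L =
        Multiset.replicate (pvCnt arr L - r - 1).toNat L + Multiset.replicate r.toNat (L + 1) +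
          ↑(arr.filter (fun x => decide (L < x))) := by
      unfold pvCanon
      have h1' : (pvCnt arr L - r).toNat = (pvCnt arr L - r - 1).toNat + 1 := by omega
      rw [h1', Multiset.replicate_succ, Multiset.cons_add, Multiset.cons_add,
        Multiset.erase_cons_head]
    by_cases hcase : r + 1 < pvCnt arr L
    · refine ⟨L, r + 1, by push_cast; omega, by push_cast; omega, by push_cast; omega, ?_⟩
      rw [hstep, herase]
      unfold pvCanon
      have e1 : (r + 1).toNat = r.toNat + 1 := by omega
      have e2 : (pvCnt arr L - (r + 1)).toNat = (pvCnt arr L - r - 1).toNat := by omega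
      rw [e1, e2, Multiset.replicate_succ]
      simp only [← Multiset.singleton_add]
      abel
    · have hceq : r + 1 = pvCnt arr L := by omega
      have hcs' := pvCost_succ arr (L + 1)
      have hc'c : pvCnt arr L ≤ pvCnt arr (L + 1) := pvCnt_mono arr (by omega)
      refine ⟨L + 1, 0, by push_cast; omega, by push_cast; omega, by push_cast; omega, ?_⟩
      rw [hstep, herase]
      unfold pvCanon
      have hz : (pvCnt arr L - r - 1).toNat = 0 := by omega
      rw [hz]
      have hsplitF := pvFilter_partition arr (fun x => decide (L < x))
        (fun x => decide (x = L + 1)) (fun x => decide (L + 1 < x))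
        (by intro x; simp; try omega) (by intro x; simp; try omega)
      have hrepl := pvFilter_replicate (p := fun x => decide (x = L + 1)) arr (L + 1)
        (by intro x _ hx; simpa using hx)
      rw [hsplitF, hrepl]
      have hsucc := pvCnt_succ arr L
      have hlen : (pvCnt arr (L + 1) - 0).toNat
          = (r.toNat + 1) + (arr.filter (fun x => decide (x = L + 1))).length := by
        omega
      rw [hlen, Multiset.replicate_add, Multiset.replicate_succ]
      simp only [← Multiset.singleton_add, Int.toNat_zero, Multiset.replicate_zero,
        zero_add, add_zero]
      abel

-- value of A's final sum on a canonical multiset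
theorem pvCanon_sum (arr : List Int) (L r : Int) (hr0 : 0 ≤ r) (hrc : r < pvCnt arr L) :
    ((pvCanon arr L r).map (fun i => if L < i then L else L - 1)).sum
      = (pvCnt arr L - r) * (L - 1) + r * L
        + ((arr.filter (fun x => decide (L < x))).length : Int) * L := by
  unfold pvCanon
  rw [Multiset.map_add, Multiset.map_add, Multiset.sum_add, Multiset.sum_add]
  rw [Multiset.map_replicate, Multiset.map_replicate]
  have hf1 : (if L < L then L else L - 1) = L - 1 := by simp
  have hf2 : (if L < L + 1 then (L:Int) else L - 1) = L := by simp
  rw [hf1, hf2, Multiset.sum_replicate, Multiset.sum_replicate]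
  have hF : (Multiset.map (fun i => if L < i then L else L - 1)
        (↑(arr.filter (fun x => decide (L < x))) : Multiset Int))
      = Multiset.replicate (arr.filter (fun x => decide (L < x))).length L := by
    rw [Multiset.map_congr rfl (g := fun _ => L)
      (by intro x hx
          rw [Multiset.mem_coe, List.mem_filter] at hx
          have := hx.2
          simp only [decide_eq_true_eq] at this
          simp [this])]
    rw [Multiset.map_const']
    simp
  rw [hF, Multiset.sum_replicate]
  rw [nsmul_eq_mul, nsmul_eq_mul, nsmul_eq_mul]
  rw [Int.toNat_of_nonneg (by omega), Int.toNat_of_nonneg hr0]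

-- ===== VERDICT (by name: the statement is the Claim_ definition above) =====
theorem permutation_string_spec : Claim_equal_permutation_string := by
  intro n k arr _ hpre
  unfold Pre_permutation_string at hpre
  unfold Spec_permutation_string
  cases hmin : PySem.List.min? arr (fun x => x) with
  | none =>
    rw [PySem.List.min?_eq_none_iff] at hmin
    exact absurd hmin hpre
  | some m0 =>
  obtain ⟨L, r, h1, h2, h3, hms⟩ := pvSim_canon arr m0 hmin k.toNat
  have hcs := pvCost_succ arr L
  have hr0 : 0 ≤ r := by omega
  have hrc : r < pvCnt arr L := by omega
  have hmemL : L ∈ pvSim k.toNat arr := by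
    rw [← Multiset.mem_coe, hms]
    unfold pvCanon
    rw [Multiset.mem_add, Multiset.mem_add]
    left; left
    rw [Multiset.mem_replicate]
    exact ⟨by omega, rfl⟩
  have hlb : ∀ x ∈ pvSim k.toNat arr, L ≤ x := by
    intro x hx
    rw [← Multiset.mem_coe, hms] at hx
    unfold pvCanon at hx
    rw [Multiset.mem_add, Multiset.mem_add] at hx
    rcases hx with (hx | hx) | hx
    · rw [Multiset.mem_replicate] at hx; omega
    · rw [Multiset.mem_replicate] at hx; omega
    · rw [Multiset.mem_coe, List.mem_filter] at hx
      have := hx.2; simp only [decide_eq_true_eq] at this; omega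
  have hminj := pvMin?_of_multiset _ L hmemL hlb
  -- A's value
  have hA : permutation_string n k arr
      = 1 + ((pvSim k.toNat arr).map (fun i => if L < i then L else L - 1)).sum := by
    unfold permutation_string
    simp only [hminj]
    exact PySem.List.foldl_add (pvSim k.toNat arr) (fun i => if L < i then L else L - 1) 1
  have hsum := congrArg (fun s : Multiset Int =>
    (s.map (fun i => if L < i then L else L - 1)).sum) hms
  simp only [Multiset.map_coe, Multiset.sum_coe] at hsum
  rw [hsum, pvCanon_sum arr L r hr0 hrc] at hA
  -- B's value
  have hkk : ((k.toNat : Int)) = max k 0 := by omega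
  have hchar := pvBS_char arr (max k 0) m0 (m0 + max k 0) (by omega)
    (by rw [pvCost_min_eq_zero arr m0 hmin]; omega)
    (by have := pvCost_top arr m0 (max k 0) hmin (by omega); omega)
  have hLL : pvBS arr (max k 0) m0 (m0 + max k 0) = L :=
    pvChar_unique arr hchar.1 hchar.2 (by omega) (by omega)
  have hB : permutation_string_alt n k arr
      = 1 + (arr.length : Int) * L
        - (pvCnt arr L - (max k 0 - pvCost arr L)) := by
    unfold permutation_string_alt
    simp only [hmin, hLL]
    rfl
  have hlen := pvLen_partition arr L
  rw [hA, hB]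
  have hr : r = max k 0 - pvCost arr L := by omega
  rw [← hr]
  have : ∀ cc rr LL lf : Int,
      1 + ((cc - rr) * (LL - 1) + rr * LL + lf * LL) = 1 + (cc + lf) * LL - (cc - rr) := by
    intro cc rr LL lf; ring
  rw [this, ← hlen]
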